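-- pv_equiv track=rewrite | github.com/YoussephAhmed/Pipeline-MIPS-Processor | assembler.py | StringToBin26
-- ===== SOURCE A (Python) =====
-- def StringToBin26(number):
--     intNum = int(number)
--     binaryValue = bin(intNum)
--     complement = ""
--     binaryVAL = ""
--     FinalVAL = ""
--     k = len(binaryValue)
--     if(intNum < 0):
--         for i in range (3 , k):
--             binaryVAL = binaryVAL + binaryValue[i]
--         complement = toTwosComplement(binaryVAL)
--         le = len(complement)
--         for i in range (le , 26):
--             FinalVAL = FinalVAL + '1'
--         FinalVAL = FinalVAL + complement
--         return(FinalVAL)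
--     else:
--         for i in range (2 , k):
--             binaryVAL = binaryVAL + binaryValue[i]
--         le = len(binaryVAL)
--         for i in range (le , 26):
--             FinalVAL = FinalVAL + '0'
--         FinalVAL = FinalVAL + binaryVAL
--         return(FinalVAL)
--
-- def toTwosComplement(binarySequence):
--     convertedSequence = [0] * len(binarySequence)
--     carryBit = 1
--     # INVERT THE BITS
--     for i in range(0, len(binarySequence)):
--         if binarySequence[i] == '0':
--             convertedSequence[i] = 1
--         else:
--             convertedSequence[i] = 0
--
--     # ADD BINARY DIGIT 1
--
--     if convertedSequence[-1] == 0: #if last digit is 0, just add the 1 then there's no carry bit so return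
--             convertedSequence[-1] = 1
--             return ''.join(str(x) for x in convertedSequence)
--
--     for bit in range(0, len(binarySequence)):
--         if carryBit == 0:
--             break
--         index = len(binarySequence) - bit - 1
--         if convertedSequence[index] == 1:
--             convertedSequence[index] = 0
--             carryBit = 1
--         else:
--             convertedSequence[index] = 1
--             carryBit = 0
--
--     return ''.join(str(x) for x in convertedSequence)
-- ===== SOURCE B (Python) =====
-- def StringToBin26(number):
--     intNum = int(number)
--     if intNum >= 0:
--         return format(intNum, 'b').rjust(26, '0')
--     width = max((-intNum).bit_length(), 26)
--     return format((1 << width) + intNum, '0%db' % width)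
-- ===== Notes on version B (the rewrite author's own statement) =====
-- stated objective: simpler
-- what changed: A builds the bit string with per-character copy loops, padding loops and a hand-written invert-then-add-carry two's-complement routine; B computes the same pattern arithmetically as format((1 << width) + intNum, ...) with width = max(bit_length, 26) (rjust for nonnegatives), with no digit loops at all.
import Mathlib
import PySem

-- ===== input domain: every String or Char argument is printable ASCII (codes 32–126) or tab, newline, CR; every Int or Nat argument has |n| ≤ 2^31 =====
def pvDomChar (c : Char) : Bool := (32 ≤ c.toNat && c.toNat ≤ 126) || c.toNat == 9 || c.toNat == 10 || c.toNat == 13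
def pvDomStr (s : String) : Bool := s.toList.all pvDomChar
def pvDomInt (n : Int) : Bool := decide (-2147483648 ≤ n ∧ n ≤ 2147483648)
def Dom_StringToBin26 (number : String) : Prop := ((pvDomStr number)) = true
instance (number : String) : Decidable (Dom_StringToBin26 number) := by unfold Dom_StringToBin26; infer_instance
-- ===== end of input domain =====

-- B replaces A's manual bit-string loops and hand-written invert-and-carry two's complement
-- with direct arithmetic: format((1 << width) + intNum, ...) / rjust (objective: simpler).
-- Strings are ported on the code-point list side (PySem.Chars / List Char), exact on the domain.

-- ===== PORT A =====
-- helper: the carry loop 'for bit in range(0, len)...' walks indices from the LAST position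
-- towards the front and stops when the carry dies; ported as structural recursion over the
-- REVERSED digit list (same visits, same state).
def tcAddCarry : List Nat → List Nat
  | [] => []
  | b :: r => if b = 1 then 0 :: tcAddCarry r else 1 :: r

-- helper: 'convertedSequence[-1] = 1' (assignment to the last cell)
def tcSetLast (l : List Nat) : List Nat :=
  match l.reverse with
  | [] => l
  | _ :: r => (1 :: r).reverse

-- helper: ''.join(str(x) for x in seq)
def tcJoin (l : List Nat) : List Char := (l.map (fun x => PySem.Int.toChars (Int.ofNat x))).flatten

def toTwosComplementPort (binarySequence : List Char) : List Char :=
  -- INVERT THE BITS: the for-loop fills convertedSequence[i] from binarySequence[i], i.e. a map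
  let convertedSequence : List Nat := binarySequence.map (fun c => if c = '0' then 1 else 0)
  -- ADD BINARY DIGIT 1
  if convertedSequence.getLast? = some 0 then
    tcJoin (tcSetLast convertedSequence)
  else
    tcJoin ((tcAddCarry convertedSequence.reverse).reverse)

def StringToBin26 (number : String) : String :=
  match PySem.Int.ofStr? number with
  | none => ""   -- int(number) raises ValueError here; excluded by Pre_
  | some intNum =>
    let binaryValue : List Char := PySem.Int.toBinChars0b intNum   -- bin(intNum)
    let k : Int := (binaryValue.length : Int)
    if intNum < 0 then
      -- for i in range(3, k): binaryVAL = binaryVAL + binaryValue[i]   (index always in range)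
      let binaryVAL : List Char := (PySem.List.pyRange 3 k 1).foldl
        (fun acc i => acc ++ [PySem.List.pyGetD binaryValue i ' ']) []
      let complement := toTwosComplementPort binaryVAL
      let le : Int := (complement.length : Int)
      let FinalVAL : List Char := (PySem.List.pyRange le 26 1).foldl (fun acc _ => acc ++ ['1']) []
      String.ofList (FinalVAL ++ complement)
    else
      let binaryVAL : List Char := (PySem.List.pyRange 2 k 1).foldl
        (fun acc i => acc ++ [PySem.List.pyGetD binaryValue i ' ']) []
      let le : Int := (binaryVAL.length : Int)
      let FinalVAL : List Char := (PySem.List.pyRange le 26 1).foldl (fun acc _ => acc ++ ['0']) []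
      String.ofList (FinalVAL ++ binaryVAL)

-- ===== PORT B =====
-- helper: left zero-padding to a width; this is both str.rjust(w, '0') and format(_, '0<w>b')
def padZeros (s : List Char) (w : Nat) : List Char := List.replicate (w - s.length) '0' ++ s

def StringToBin26_alt (number : String) : String :=
  match PySem.Int.ofStr? number with
  | none => ""   -- int(number) raises ValueError here; excluded by Pre_
  | some intNum =>
    if 0 ≤ intNum then
      String.ofList (padZeros (PySem.Int.toBinChars intNum) 26)        -- format(n,'b').rjust(26,'0')
    else
      let width : Nat := max (PySem.Int.bitLength (-intNum)) 26
      String.ofList (padZeros (PySem.Int.toBinChars (((1 : Int) <<< width) + intNum)) width)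

-- ===== PRECONDITION & SPEC =====
-- Pre_ excludes exactly the strings int() rejects, where A raises ValueError.
def Pre_StringToBin26 (number : String) : Prop := (PySem.Int.ofStr? number).isSome = true
instance (number : String) : Decidable (Pre_StringToBin26 number) := by unfold Pre_StringToBin26; infer_instance
def pvWitness_StringToBin26 : String := "-5"

def Spec_StringToBin26 (number : String) (out : String) : Prop := out = StringToBin26_alt number
instance (number : String) (out : String) : Decidable (Spec_StringToBin26 number out) := by unfold Spec_StringToBin26; infer_instance

-- ===== CLAIM (what is proved, stated in full; the proofs are below) =====
def Claim_equal_StringToBin26 : Prop := ∀ (number : String), Dom_StringToBin26 number → Pre_StringToBin26 number → Spec_StringToBin26 number (StringToBin26 number)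

-- ===== LEMMAS AND PROOFS =====

-- the w-bit binary representation of v, least-significant bit first (proof device)
def padRevC : Nat → Nat → List Char
  | 0, _ => []
  | w+1, v => (if v % 2 = 1 then '1' else '0') :: padRevC w (v / 2)

-- same thing over the 0/1 integers A's toTwosComplement manipulates
def padRevN : Nat → Nat → List Nat
  | 0, _ => []
  | w+1, v => (v % 2) :: padRevN w (v / 2)

lemma length_padRevC (w v : Nat) : (padRevC w v).length = w := by
  induction w generalizing v with
  | zero => rfl
  | succ w ih => simp [padRevC, ih]

lemma padRevC_congr (w : Nat) : ∀ {x y : Nat}, x % 2 ^ w = y % 2 ^ w → padRevC w x = padRevC w y := by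
  induction w with
  | zero => intro x y _; rfl
  | succ w ih =>
    intro x y h
    have hpow : (2:Nat) ^ (w+1) = 2 * 2 ^ w := by ring
    rw [hpow] at h
    have h2 : x % 2 = y % 2 := by
      have hx : x % (2 * 2 ^ w) % 2 = x % 2 := Nat.mod_mod_of_dvd x ⟨2 ^ w, rfl⟩
      have hy : y % (2 * 2 ^ w) % 2 = y % 2 := Nat.mod_mod_of_dvd y ⟨2 ^ w, rfl⟩
      rw [← hx, ← hy, h]
    have h3 : x / 2 % 2 ^ w = y / 2 % 2 ^ w := by
      have hx := Nat.mod_mul_right_div_self x 2 (2 ^ w)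
      have hy := Nat.mod_mul_right_div_self y 2 (2 ^ w)
      rw [← hx, ← hy, h]
    simp [padRevC, h2, ih h3]

lemma padRevC_add_right (a b : Nat) : ∀ v, padRevC (a + b) v = padRevC a v ++ padRevC b (v / 2 ^ a) := by
  induction a with
  | zero => intro v; simp [padRevC]
  | succ a ih =>
    intro v
    have : a + 1 + b = (a + b) + 1 := by omega
    rw [this]
    simp only [padRevC, ih (v / 2), List.cons_append]
    congr 2
    rw [Nat.div_div_eq_div_mul]
    ring_nf

lemma padRevC_all_ones (w : Nat) : padRevC w (2 ^ w - 1) = List.replicate w '1' := by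
  induction w with
  | zero => rfl
  | succ w ih =>
    have hp : 0 < 2 ^ w := Nat.two_pow_pos w
    have h1 : (2 ^ (w + 1) - 1) % 2 = 1 := by
      have : 2 ^ (w + 1) = 2 * 2 ^ w := by ring
      omega
    have h2 : (2 ^ (w + 1) - 1) / 2 = 2 ^ w - 1 := by
      have : 2 ^ (w + 1) = 2 * 2 ^ w := by ring
      omega
    simp [padRevC, h1, h2, ih, List.replicate_succ]

lemma padRevC_zero (w : Nat) : padRevC w 0 = List.replicate w '0' := by
  induction w with
  | zero => rfl
  | succ w ih => simp [padRevC, ih, List.replicate_succ]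

-- Nat.toDigits 2 writes exactly the bitLength-wide binary digits, most significant first
lemma toDigitsCore_two_eq (f : Nat) : ∀ n l, 0 < n → n < f →
    Nat.toDigitsCore 2 f n l = (padRevC (PySem.Int.bitLength (n : Int)) n).reverse ++ l := by
  induction f with
  | zero => intro n l h1 h2; omega
  | succ f ih =>
    intro n l h1 h2
    rw [Nat.toDigitsCore]
    have hbl := PySem.Int.bitLength_natCast (m := n) h1
    by_cases hd : n / 2 = 0
    · have hn1 : n = 1 := by omega
      subst hn1
      have hb1 : PySem.Int.bitLength ((1:Nat) : Int) = 1 := by decide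
      have hr : (padRevC 1 1).reverse = ['1'] := rfl
      rw [hb1, hr]
      simp [hd]
      rfl
    · simp only [hd, if_false]
      rw [ih (n / 2) _ (by omega) (by omega)]
      rw [hbl]
      have hdig : Nat.digitChar (n % 2) = (if n % 2 = 1 then '1' else '0') := by
        rcases Nat.mod_two_eq_zero_or_one n with h | h <;> rw [h] <;> rfl
      simp [padRevC, hdig]

lemma toDigits_two_eq (n : Nat) (h : 0 < n) :
    Nat.toDigits 2 n = (padRevC (PySem.Int.bitLength (n : Int)) n).reverse := by
  rw [Nat.toDigits, toDigitsCore_two_eq (n + 1) n [] h (by omega), List.append_nil]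

-- inverting the printed bits of v gives the bits of 2^w - 1 - v
lemma map_inv_padRevC (w : Nat) : ∀ v, v < 2 ^ w →
    (padRevC w v).map (fun c => if c = '0' then (1:Nat) else 0) = padRevN w (2 ^ w - 1 - v) := by
  induction w with
  | zero => intro v _; rfl
  | succ w ih =>
    intro v hv
    have hpow : (2:Nat) ^ (w+1) = 2 * 2 ^ w := by ring
    have hp : 0 < 2 ^ w := Nat.two_pow_pos w
    have hhead : (2 ^ (w+1) - 1 - v) % 2 = 1 - v % 2 := by omega
    have htail : (2 ^ (w+1) - 1 - v) / 2 = 2 ^ w - 1 - v / 2 := by omega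
    have htl := ih (v / 2) (by omega)
    rcases Nat.mod_two_eq_zero_or_one v with h | h <;>
      simp [padRevC, padRevN, h, hhead, htail, htl]

-- A's carry loop adds one (LSB-first)
lemma tcAddCarry_padRevN (w : Nat) : ∀ v, tcAddCarry (padRevN w v) = padRevN w (v + 1) := by
  induction w with
  | zero => intro v; rfl
  | succ w ih =>
    intro v
    rcases Nat.mod_two_eq_zero_or_one v with h | h
    · have h1 : (v + 1) % 2 = 1 := by omega
      have h2 : (v + 1) / 2 = v / 2 := by omega
      simp [padRevN, tcAddCarry, h, h1, h2]
    · have h1 : (v + 1) % 2 = 0 := by omega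
      have h2 : (v + 1) / 2 = v / 2 + 1 := by omega
      simp [padRevN, tcAddCarry, h, h1, h2, ih]

lemma padRevN_lt_two (w : Nat) : ∀ v, ∀ x ∈ padRevN w v, x < 2 := by
  induction w with
  | zero => intro v x hx; simp [padRevN] at hx
  | succ w ih =>
    intro v x hx
    simp only [padRevN, List.mem_cons] at hx
    rcases hx with h | h
    · omega
    · exact ih _ x h

lemma tcJoin_eq_map {l : List Nat} (h : ∀ x ∈ l, x < 2) :
    tcJoin l = l.map (fun x => if x = 1 then '1' else '0') := by
  induction l with
  | nil => rfl
  | cons a t ih =>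
    have ha : a < 2 := h a (by simp)
    have ht := ih (fun x hx => h x (by simp [hx]))
    simp only [tcJoin, List.map_cons, List.flatten_cons] at ht ⊢
    rw [ht]
    interval_cases a
    · have h0 : PySem.Int.toChars (Int.ofNat 0) = ['0'] := by decide
      rw [h0]; rfl
    · have h1 : PySem.Int.toChars (Int.ofNat 1) = ['1'] := by decide
      rw [h1]; rfl

lemma map_bit_padRevN (w : Nat) : ∀ v, (padRevN w v).map (fun x => if x = 1 then '1' else '0') = padRevC w v := by
  induction w with
  | zero => intro v; rfl
  | succ w ih => intro v; simp [padRevN, padRevC, ih]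

-- both branches of toTwosComplement are the carry loop on the reversed inverted digits
lemma toTwosComplement_unified (l : List Char) :
    toTwosComplementPort l =
      tcJoin ((tcAddCarry ((l.map (fun c => if c = '0' then (1:Nat) else 0)).reverse)).reverse) := by
  set c : List Nat := l.map (fun c => if c = '0' then (1:Nat) else 0) with hc
  have hbody : toTwosComplementPort l =
      if c.getLast? = some 0 then tcJoin (tcSetLast c)
      else tcJoin ((tcAddCarry c.reverse).reverse) := rfl
  rw [hbody]
  rcases hrev : c.reverse with _ | ⟨b, r⟩
  · have hc0 : c = [] := by
      have := congrArg List.reverse hrev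
      simpa using this
    simp [hc0, tcAddCarry]
  · have hlast : c.getLast? = some b := by rw [← List.head?_reverse, hrev]; rfl
    by_cases hb : b = 0
    · subst hb
      rw [hlast, if_pos rfl]
      have hset : tcSetLast c = (1 :: r).reverse := by unfold tcSetLast; rw [hrev]
      rw [hset]
      simp [tcAddCarry]
    · have hne : ¬ (c.getLast? = some 0) := by rw [hlast]; simpa using hb
      rw [if_neg hne]

-- the composite: toTwosComplement of the printed bits of m is the printed w-bit pattern of 2^w - m
lemma toTwosComplement_padRevC (w m : Nat) (h2 : m < 2 ^ w) :
    toTwosComplementPort ((padRevC w m).reverse) = (padRevC w (2 ^ w - m)).reverse := by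
  rw [toTwosComplement_unified, List.map_reverse, List.reverse_reverse,
    map_inv_padRevC w m h2, tcAddCarry_padRevN]
  have harg : 2 ^ w - 1 - m + 1 = 2 ^ w - m := by
    have := Nat.two_pow_pos w
    omega
  rw [harg, tcJoin_eq_map (fun x hx => padRevN_lt_two w _ x (List.mem_reverse.mp hx)),
    List.map_reverse, map_bit_padRevN]

lemma bitLength_le_of_lt {n w : Nat} (h : n < 2 ^ w) : PySem.Int.bitLength (n : Int) ≤ w := by
  by_contra hlt
  push Not at hlt
  have hn : n ≠ 0 := by
    intro h0; subst h0
    rw [show ((0:Nat):Int) = 0 from rfl, PySem.Int.bitLength_zero] at hlt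
    omega
  have h2 := PySem.Int.two_pow_bitLength_le (n : Int) (by exact_mod_cast hn)
  rw [Int.natAbs_natCast] at h2
  have h3 : 2 ^ w ≤ 2 ^ (PySem.Int.bitLength (n:Int) - 1) := Nat.pow_le_pow_right (by omega) (by omega)
  omega

lemma foldl_append_const_list {α : Type} (l : List α) (c : Char) : ∀ acc : List Char,
    l.foldl (fun acc _ => acc ++ [c]) acc = acc ++ List.replicate l.length c := by
  induction l with
  | nil => intro acc; simp
  | cons a t ih =>
    intro acc
    simp only [List.foldl_cons, ih, List.length_cons]
    simp [List.replicate_succ, List.append_assoc]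

lemma neg_case_key (L w m : Nat) (h1 : 0 < m) (h2 : m < 2 ^ L) (hw : w = max L 26) :
    List.replicate (26 - L) '1' ++ (padRevC L (2 ^ L - m)).reverse
      = List.replicate (w - PySem.Int.bitLength ((2 ^ w - m : Nat) : Int)) '0'
        ++ (padRevC (PySem.Int.bitLength ((2 ^ w - m : Nat) : Int)) (2 ^ w - m)).reverse := by
  have hLw : L ≤ w := by omega
  have hpowle : (2:Nat) ^ L ≤ 2 ^ w := Nat.pow_le_pow_right (by omega) hLw
  set T : Nat := 2 ^ w - m with hT
  set B : Nat := PySem.Int.bitLength (T : Int) with hB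
  have hTpos : 0 < T := by omega
  have hTlt : T < 2 ^ w := by omega
  have hBle : B ≤ w := bitLength_le_of_lt hTlt
  have hTltB : T < 2 ^ B := by
    have := PySem.Int.lt_two_pow_bitLength (T : Int)
    rwa [Int.natAbs_natCast] at this
  -- the whole w-bit pattern of T, written two ways
  have hsplitR : padRevC w T = padRevC B T ++ List.replicate (w - B) '0' := by
    have h := padRevC_add_right B (w - B) T
    rw [Nat.add_sub_cancel' hBle] at h
    rw [h, Nat.div_eq_of_lt hTltB, padRevC_zero]
  have hq : (2:Nat) ^ w = 2 ^ L * 2 ^ (w - L) := by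
    rw [← pow_add, Nat.add_sub_cancel' hLw]
  have hqpos : 0 < 2 ^ (w - L) := Nat.two_pow_pos _
  have h2L := Nat.two_pow_pos L
  have hmul : (2 ^ (w - L) - 1) * 2 ^ L = 2 ^ w - 2 ^ L := by
    rw [Nat.sub_mul, one_mul, mul_comm, ← hq]
  have hmodL : T % 2 ^ L = 2 ^ L - m := by
    have hTeq : T = (2 ^ L - m) + (2 ^ (w - L) - 1) * 2 ^ L := by omega
    rw [hTeq, Nat.add_mul_mod_self_right, Nat.mod_eq_of_lt (by omega)]
  have hdivL : T / 2 ^ L = 2 ^ (w - L) - 1 := by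
    apply Nat.div_eq_of_lt_le
    · omega
    · have hstep : (2 ^ (w - L) - 1 + 1) * 2 ^ L = 2 ^ w := by
        have : (2 ^ (w - L) - 1 + 1) = 2 ^ (w - L) := by omega
        rw [this, mul_comm, ← hq]
      omega
  have hsplitL : padRevC w T = padRevC L (2 ^ L - m) ++ List.replicate (w - L) '1' := by
    have h := padRevC_add_right L (w - L) T
    rw [Nat.add_sub_cancel' hLw] at h
    rw [h, hdivL, padRevC_all_ones]
    congr 1
    exact padRevC_congr L (by rw [hmodL, Nat.mod_eq_of_lt (by omega)])
  have h26 : 26 - L = w - L := by omega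
  calc List.replicate (26 - L) '1' ++ (padRevC L (2 ^ L - m)).reverse
      = (padRevC L (2 ^ L - m) ++ List.replicate (w - L) '1').reverse := by
        rw [List.reverse_append, List.reverse_replicate, h26]
    _ = (padRevC w T).reverse := by rw [hsplitL]
    _ = (padRevC B T ++ List.replicate (w - B) '0').reverse := by rw [hsplitR]
    _ = List.replicate (w - B) '0' ++ (padRevC B T).reverse := by
        rw [List.reverse_append, List.reverse_replicate]

-- the character-copying loop 'for i in range(a, len(bv)): out += bv[i]' copies bv[a:]
lemma loop_copy (bv : List Char) (a : Int) (ha : 0 ≤ a) :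
    List.foldl (fun acc i => acc ++ [PySem.List.pyGetD bv i ' ']) [] (PySem.List.pyRange a (bv.length : Int) 1) = bv.drop a.toNat := by
  rw [PySem.List.foldl_pyRange_pyGetD' bv ' ' (fun acc c => acc ++ [c]) [] ha,
      PySem.List.foldl_append_singleton_eq_self, List.nil_append]

-- the padding loop 'for i in range(a, b): out += c' appends (b-a) copies of c
lemma loop_pad (a b : Int) (c : Char) :
    List.foldl (fun acc _ => acc ++ [c]) ([] : List Char) (PySem.List.pyRange a b 1) = List.replicate (b - a).toNat c := by
  rw [foldl_append_const_list (PySem.List.pyRange a b 1) c [], PySem.List.length_pyRange_one]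
  simp

theorem StringToBin26_spec : Claim_equal_StringToBin26 := by
  intro number _ hpre
  unfold Spec_StringToBin26 StringToBin26 StringToBin26_alt
  rcases hofs : PySem.Int.ofStr? number with _ | intNum
  · simp [Pre_StringToBin26, hofs] at hpre
  · simp only []
    by_cases hneg : intNum < 0
    · rw [if_pos hneg, if_neg (by omega : ¬ (0:Int) ≤ intNum)]
      obtain ⟨m, hint, hm⟩ : ∃ m : Nat, intNum = -(m : Int) ∧ 0 < m := ⟨intNum.natAbs, by omega, by omega⟩
      set L : Nat := PySem.Int.bitLength ((m : Nat) : Int) with hL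
      have hmL : m < 2 ^ L := by
        have := PySem.Int.lt_two_pow_bitLength ((m : Nat) : Int)
        rwa [Int.natAbs_natCast] at this
      have hbv : PySem.Int.toBinChars0b intNum = '-' :: '0' :: 'b' :: Nat.toDigits 2 m := by
        unfold PySem.Int.toBinChars0b
        rw [if_pos hneg, show intNum.natAbs = m from by omega]
      have hdig : Nat.toDigits 2 m = (padRevC L m).reverse := toDigits_two_eq m hm
      rw [hbv]
      rw [loop_copy ('-' :: '0' :: 'b' :: Nat.toDigits 2 m) 3 (by omega)]
      have hdrop : ('-' :: '0' :: 'b' :: Nat.toDigits 2 m).drop (3:Int).toNat = (padRevC L m).reverse := by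
        rw [hdig]; rfl
      rw [hdrop, toTwosComplement_padRevC L m hmL]
      have hlen : (((padRevC L (2 ^ L - m)).reverse.length : Nat) : Int) = (L : Int) := by
        rw [List.length_reverse, length_padRevC]
      rw [hlen, loop_pad (L : Int) 26 '1']
      have hbneg : PySem.Int.bitLength (-intNum) = L := by rw [show -intNum = ((m : Nat) : Int) by omega]
      rw [hbneg]
      set w : Nat := max L 26 with hwdef
      have hLw : L ≤ w := le_max_left _ _
      have hm2w : m < 2 ^ w := lt_of_lt_of_le hmL (Nat.pow_le_pow_right (by omega) hLw)
      have harg : (1 : Int) <<< w + intNum = ((2 ^ w - m : Nat) : Int) := by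
        rw [Int.shiftLeft_eq, one_mul, hint,
            Nat.cast_sub (le_of_lt hm2w), Nat.cast_pow]
        push_cast
        ring
      rw [harg]
      set T : Nat := 2 ^ w - m with hTdef
      have hTpos : 0 < T := by omega
      have hbcB : PySem.Int.toBinChars ((T : Nat) : Int) = Nat.toDigits 2 T := by
        unfold PySem.Int.toBinChars
        rw [if_neg (by omega : ¬ ((T : Nat) : Int) < 0), Int.toNat_natCast]
      rw [hbcB, toDigits_two_eq T hTpos]
      unfold padZeros
      rw [List.length_reverse, length_padRevC,
          show ((26 : Int) - (L : Int)).toNat = 26 - L from by omega]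
      exact congrArg String.ofList (neg_case_key L w m hm hmL hwdef)
    · rw [if_neg hneg, if_pos (by omega : (0:Int) ≤ intNum)]
      have hbv : PySem.Int.toBinChars0b intNum = '0' :: 'b' :: Nat.toDigits 2 intNum.toNat := by
        unfold PySem.Int.toBinChars0b
        rw [if_neg hneg]
      set D : List Char := Nat.toDigits 2 intNum.toNat with hD
      rw [hbv]
      rw [loop_copy ('0' :: 'b' :: D) 2 (by omega)]
      have hdrop : ('0' :: 'b' :: D).drop (2:Int).toNat = D := rfl
      rw [hdrop, loop_pad ((D.length : Nat) : Int) 26 '0']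
      have hbc : PySem.Int.toBinChars intNum = D := by
        unfold PySem.Int.toBinChars
        rw [if_neg hneg]
      rw [hbc]
      unfold padZeros
      rw [show ((26 : Int) - ((D.length : Nat) : Int)).toNat = 26 - D.length from by omega]
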